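-- pv_equiv track=rewrite | github.com/Satoru577/Reversi_game | board.py | judg_RU
-- ===== SOURCE A (Python) =====
-- WHITE = (255, 255, 255)
--
-- BLACK = (0, 0, 0)
--
-- def judg_RU(cells, idx_v, idx_h, count, can_put):
--     judg_flag = True
--     while judg_flag:
--         idx_L = idx_v - 1
--         idx_U = idx_h + 1
--         if 0 <= idx_L <= 7 and 0 <= idx_U <= 7:
--             judg = count
--             if cells[idx_L][idx_U][3] == WHITE:
--                 count -= 1
--             elif cells[idx_L][idx_U][3] == BLACK:
--                 count += 1
--             else:
--                 judg_flag = False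
--                 continue
--             if count == 0:
--                 judg_flag = False
--                 continue
--
--             if abs(judg) < abs(count):
--                 can_put = judg_RU(cells, idx_L, idx_U, count, can_put)
--             elif abs(judg) > abs(count):
--                 can_put = 1
--             else:
--                 can_put = 0
--             judg_flag = False
--         else:
--             judg_flag = False
--     return can_put
-- ===== SOURCE B (Python) =====
-- WHITE = (255, 255, 255)
--
-- BLACK = (0, 0, 0)
--
-- def judg_RU(cells, idx_v, idx_h, count, can_put):
--     v = idx_v - 1
--     h = idx_h + 1
--     while 0 <= v <= 7 and 0 <= h <= 7:
--         cell = cells[v][h][3]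
--         if cell == WHITE:
--             new = count - 1
--         elif cell == BLACK:
--             new = count + 1
--         else:
--             return can_put
--         if new == 0:
--             return can_put
--         if abs(new) < abs(count):
--             return 1
--         count = new
--         v -= 1
--         h += 1
--     return can_put
-- ===== Notes on version B (the rewrite author's own statement) =====
-- stated objective: simpler
-- what changed: A's per-step tail recursion (a while loop whose body always runs once and recurses into judg_RU for the next diagonal square) is replaced by a single iterative while loop that walks the up-right diagonal carrying (v, h, count); the unreachable abs-equal branch (return 0) disappears since |count| and |count±1| are never equal.
import Mathlib
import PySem

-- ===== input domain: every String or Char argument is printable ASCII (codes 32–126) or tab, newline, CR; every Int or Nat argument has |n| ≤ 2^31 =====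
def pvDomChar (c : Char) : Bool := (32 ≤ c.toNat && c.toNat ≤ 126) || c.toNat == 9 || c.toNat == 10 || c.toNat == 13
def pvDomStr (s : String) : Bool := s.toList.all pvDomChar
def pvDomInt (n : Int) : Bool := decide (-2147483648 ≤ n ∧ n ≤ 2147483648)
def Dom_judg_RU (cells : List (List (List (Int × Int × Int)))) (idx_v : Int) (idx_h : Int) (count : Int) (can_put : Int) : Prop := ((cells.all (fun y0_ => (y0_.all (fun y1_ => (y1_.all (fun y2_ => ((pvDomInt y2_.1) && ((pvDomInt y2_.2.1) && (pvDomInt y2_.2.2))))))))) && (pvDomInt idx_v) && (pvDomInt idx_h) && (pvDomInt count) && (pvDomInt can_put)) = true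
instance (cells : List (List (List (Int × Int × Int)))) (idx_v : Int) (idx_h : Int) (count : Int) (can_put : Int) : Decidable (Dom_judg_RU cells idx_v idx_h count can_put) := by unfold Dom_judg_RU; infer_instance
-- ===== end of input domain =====

-- B replaces A's per-step tail recursion (one-shot while + recursive call) with a single
-- iterative diagonal walk carrying (v, h, count); objective: simpler (the unreachable
-- abs-equal branch disappears). Equivalence is on the return value.

-- shared accessor: cells[v][h][3] ; none exactly where Python raises IndexError
def pvCell3? (cells : List (List (List (Int × Int × Int)))) (v h : Int) : Option (Int × Int × Int) :=
  match PySem.List.pyGet? cells v with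
  | none => none
  | some row =>
    match PySem.List.pyGet? row h with
    | none => none
    | some cell => PySem.List.pyGet? cell 3

-- ===== PORT A =====
-- A's while loop body sets judg_flag := False on every path, so it runs exactly once;
-- the walk happens through the recursive call judg_RU(cells, idx_L, idx_U, count, can_put).
def judg_RU (cells : List (List (List (Int × Int × Int)))) (idx_v : Int) (idx_h : Int) (count : Int) (can_put : Int) : Int :=
  let idx_L := idx_v - 1
  let idx_U := idx_h + 1
  if hg : 0 ≤ idx_L ∧ idx_L ≤ 7 ∧ 0 ≤ idx_U ∧ idx_U ≤ 7 then
    let judg := count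
    match pvCell3? cells idx_L idx_U with
    | none => 0  -- Python raises IndexError here; excluded by Pre_judg_RU
    | some c =>
      if c = (255, 255, 255) ∨ c = (0, 0, 0) then
        let count' := if c = (255, 255, 255) then count - 1 else count + 1
        if count' = 0 then can_put
        else if judg.natAbs < count'.natAbs then
          judg_RU cells idx_L idx_U count' can_put
        else if judg.natAbs > count'.natAbs then 1
        else 0
      else can_put  -- neither WHITE nor BLACK: judg_flag = False, continue → return can_put
  else can_put
termination_by idx_v.toNat
decreasing_by omega

-- ===== PORT B =====
-- the while loop of Source B, state (v, h, count); `new?` is Source B's if/elif/else-return on the colour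
def pvWalk (cells : List (List (List (Int × Int × Int)))) (v h count can_put : Int) : Int :=
  if hg : 0 ≤ v ∧ v ≤ 7 ∧ 0 ≤ h ∧ h ≤ 7 then
    match pvCell3? cells v h with
    | none => 0  -- Python raises IndexError here; excluded by Pre_judg_RU
    | some c =>
      let new? : Option Int :=
        if c = (255, 255, 255) then some (count - 1)
        else if c = (0, 0, 0) then some (count + 1)
        else none
      match new? with
      | none => can_put            -- neither WHITE nor BLACK: return can_put
      | some new =>
        if new = 0 then can_put
        else if new.natAbs < count.natAbs then 1
        else pvWalk cells (v - 1) (h + 1) new can_put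
  else can_put
termination_by (v + 1).toNat
decreasing_by omega

def judg_RU_alt (cells : List (List (List (Int × Int × Int)))) (idx_v : Int) (idx_h : Int) (count : Int) (can_put : Int) : Int :=
  pvWalk cells (idx_v - 1) (idx_h + 1) count can_put

-- ===== PRECONDITION & SPEC =====
-- Pre_ excludes boards that are not a full 8×8 grid of ≥4-entry cells when the starting
-- diagonal square is on the board: on such boards the walk may index a missing row/cell
-- and raise IndexError; the exact raising set depends on the colours along the path, so
-- this closed-form condition also excludes some short boards on which A happens to return.
def Pre_judg_RU (cells : List (List (List (Int × Int × Int)))) (idx_v : Int) (idx_h : Int) (count : Int) (can_put : Int) : Prop :=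
  (¬ (0 ≤ idx_v - 1 ∧ idx_v - 1 ≤ 7 ∧ 0 ≤ idx_h + 1 ∧ idx_h + 1 ≤ 7)) ∨
  (cells.length ≥ 8 ∧ ∀ row ∈ cells, row.length ≥ 8 ∧ ∀ cell ∈ row, cell.length ≥ 4)
instance (cells : List (List (List (Int × Int × Int)))) (idx_v : Int) (idx_h : Int) (count : Int) (can_put : Int) : Decidable (Pre_judg_RU cells idx_v idx_h count can_put) := by unfold Pre_judg_RU; infer_instance

def pvWitness_judg_RU : (List (List (List (Int × Int × Int)))) × Int × Int × Int × Int := ([], 0, 0, 1, 0)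

def Spec_judg_RU (cells : List (List (List (Int × Int × Int)))) (idx_v : Int) (idx_h : Int) (count : Int) (can_put : Int) (out : Int) : Prop := out = judg_RU_alt cells idx_v idx_h count can_put
instance (cells : List (List (List (Int × Int × Int)))) (idx_v : Int) (idx_h : Int) (count : Int) (can_put : Int) (out : Int) : Decidable (Spec_judg_RU cells idx_v idx_h count can_put out) := by unfold Spec_judg_RU; infer_instance

-- ===== CLAIM (what is proved, stated in full; the proofs are below) =====
def Claim_equal_judg_RU : Prop := ∀ (cells : List (List (List (Int × Int × Int)))) (idx_v : Int) (idx_h : Int) (count : Int) (can_put : Int), Dom_judg_RU cells idx_v idx_h count can_put → Pre_judg_RU cells idx_v idx_h count can_put → Spec_judg_RU cells idx_v idx_h count can_put (judg_RU cells idx_v idx_h count can_put)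

-- ===== LEMMAS AND PROOFS =====

-- A's walk equals B's walk (unconditionally: the two ports agree as Lean functions;
-- Pre_judg_RU is what ties them to the Pythons, which raise IndexError off the board)
theorem judg_RU_eq_pvWalk (cells : List (List (List (Int × Int × Int)))) (idx_v idx_h count can_put : Int) :
    judg_RU cells idx_v idx_h count can_put = pvWalk cells (idx_v - 1) (idx_h + 1) count can_put := by
  induction hn : idx_v.toNat using Nat.strong_induction_on generalizing idx_v idx_h count with
  | _ n ih =>
  rw [judg_RU, pvWalk]
  by_cases hg : 0 ≤ idx_v - 1 ∧ idx_v - 1 ≤ 7 ∧ 0 ≤ idx_h + 1 ∧ idx_h + 1 ≤ 7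
  · simp only [dif_pos hg]
    cases hc : pvCell3? cells (idx_v - 1) (idx_h + 1) with
    | none => rfl
    | some c =>
      by_cases hw : c = (255, 255, 255)
      · -- WHITE: count' = count - 1
        simp only [hw, if_pos rfl, or_true, true_or, if_true]
        by_cases h0 : count - 1 = 0
        · simp [h0]
        · have hne : count.natAbs ≠ (count - 1).natAbs := by omega
          by_cases hlt : count.natAbs < (count - 1).natAbs
          · simp only [if_neg h0, if_pos hlt, if_neg (by omega : ¬ (count - 1).natAbs < count.natAbs)]
            rw [ih (idx_v - 1).toNat (by omega) (idx_v - 1) (idx_h + 1) (count - 1) rfl]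
          · simp only [if_neg h0, if_neg hlt, if_pos (by omega : count.natAbs > (count - 1).natAbs),
              if_pos (by omega : (count - 1).natAbs < count.natAbs)]
      · by_cases hb : c = (0, 0, 0)
        · simp only [hw, hb, if_neg hw, if_pos rfl, or_true, if_true]
          by_cases h0 : count + 1 = 0
          · simp [h0, hw]
          · by_cases hlt : count.natAbs < (count + 1).natAbs
            · simp only [if_neg (show ¬((0,0,0):ℤ×ℤ×ℤ) = (255,255,255) by decide), if_neg h0,
                if_pos hlt, if_neg (by omega : ¬ (count + 1).natAbs < count.natAbs)]
              rw [ih (idx_v - 1).toNat (by omega) (idx_v - 1) (idx_h + 1) (count + 1) rfl]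
            · simp only [if_neg (show ¬((0,0,0):ℤ×ℤ×ℤ) = (255,255,255) by decide), if_neg h0,
                if_neg hlt, if_pos (by omega : count.natAbs > (count + 1).natAbs),
                if_pos (by omega : (count + 1).natAbs < count.natAbs)]
        · simp [hw, hb]
  · simp only [dif_neg hg]

-- ===== VERDICT (by name: the statement is the Claim_ definition above) =====
theorem judg_RU_spec : Claim_equal_judg_RU := by
  intro cells idx_v idx_h count can_put _ _
  unfold Spec_judg_RU judg_RU_alt
  exact judg_RU_eq_pvWalk cells idx_v idx_h count can_put
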